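-- pv_equiv track=rewrite | github.com/botzaifa/CS50-Python | Week_4/Problem_Set_4/emojize/emojize.py | emojize_text
-- ===== SOURCE A (Python) =====
-- def emojize_text(input_text):
--     alias_mapping = {
--         ":thumbsup:": "👍",
--         ":smile:": "😊",
--         ":earth_asia:": "🌏",
--         ":1st_place_medal:": "🥇",
--         ":candy:": "🍬",
--         ":ice_cream:": "🍨"
--     }
--
--     for alias, emoji_char in alias_mapping.items():
--         input_text = input_text.replace(alias, emoji_char)
--
--     return input_text
-- ===== SOURCE B (Python) =====
-- import re
--
-- _ALIAS_MAPPING = {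
--     ":thumbsup:": "👍",
--     ":smile:": "😊",
--     ":earth_asia:": "🌏",
--     ":1st_place_medal:": "🥇",
--     ":candy:": "🍬",
--     ":ice_cream:": "🍨"
-- }
--
-- _PATTERN = re.compile("|".join(map(re.escape, _ALIAS_MAPPING)))
--
-- def emojize_text(input_text):
--     return _PATTERN.sub(lambda m: _ALIAS_MAPPING[m.group(0)], input_text)
-- ===== Notes on version B (the rewrite author's own statement) =====
-- stated objective: idiomatic
-- what changed: A makes six sequential full-text str.replace passes (one per alias); B compiles one regex alternating over the alias keys and rewrites the text in a single left-to-right pattern.sub scan with a dict lookup per match.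
-- outside the precondition, e.g. on emojize_text(':smile:thumbsup:'): A returns ':smile👍', B returns '😊thumbsup:'
import Mathlib
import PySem

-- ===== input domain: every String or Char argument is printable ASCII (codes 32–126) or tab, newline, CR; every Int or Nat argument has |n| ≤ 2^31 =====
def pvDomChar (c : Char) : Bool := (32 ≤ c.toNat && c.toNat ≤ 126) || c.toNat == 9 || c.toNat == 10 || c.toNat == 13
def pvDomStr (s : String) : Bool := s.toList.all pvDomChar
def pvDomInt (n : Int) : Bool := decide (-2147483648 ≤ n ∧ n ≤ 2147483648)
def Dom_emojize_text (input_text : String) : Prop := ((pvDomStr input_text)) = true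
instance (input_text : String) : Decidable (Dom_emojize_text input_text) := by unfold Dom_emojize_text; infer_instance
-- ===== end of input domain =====

-- B replaces A's six sequential full-text `.replace` passes by ONE left-to-right scan that tries the
-- aliases in dict order at each position (the regex-alternation idiom); equivalence is proved for
-- inputs without overlapping alias occurrences (Pre_), where the two strategies provably agree.

-- ===== PORT A =====
-- A: a dict literal iterated in insertion order, each alias replaced in the whole string in turn.
def emojize_text (input_text : String) : String :=
  List.foldl (fun acc (p : String × String) => PySem.Str.replace acc p.1 p.2) input_text
    [(":thumbsup:", "👍"), (":smile:", "😊"), (":earth_asia:", "🌏"),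
     (":1st_place_medal:", "🥇"), (":candy:", "🍬"), (":ice_cream:", "🍨")]

-- ===== PORT B =====
-- B (Source B): one regex built from the alias keys, `pattern.sub` = a single left-to-right scan that at
-- each position tries the alternatives in key order (exact port of re.sub for a literal alternation:
-- leftmost match, first alternative wins, non-overlapping).
def pvA1 : List Char := ":thumbsup:".toList
def pvA2 : List Char := ":smile:".toList
def pvA3 : List Char := ":earth_asia:".toList
def pvA4 : List Char := ":1st_place_medal:".toList
def pvA5 : List Char := ":candy:".toList
def pvA6 : List Char := ":ice_cream:".toList

def pvAliasPairs : List (List Char × Char) :=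
  [(pvA1, '👍'), (pvA2, '😊'), (pvA3, '🌏'), (pvA4, '🥇'), (pvA5, '🍬'), (pvA6, '🍨')]

def pvTryMatch : List (List Char × Char) → List Char → Option (Char × Nat)
  | [], _ => none
  | (a, e) :: ps, l => if a.isPrefixOf l then some (e, a.length) else pvTryMatch ps l

def pvScan (l : List Char) : List Char :=
  match l with
  | [] => []
  | c :: t =>
    match pvTryMatch pvAliasPairs (c :: t) with
    | some (e, k) => e :: pvScan (t.drop (k - 1))
    | none => c :: pvScan t
termination_by l.length
decreasing_by
  all_goals simp

def emojize_text_alt (input_text : String) : String :=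
  String.ofList (pvScan input_text.toList)

-- ===== PRECONDITION & SPEC =====
-- Pre_ excludes inputs containing two OVERLAPPING alias occurrences (a substring like ":smile:thumbsup:"
-- sharing the middle colon): there A's sequential passes and B's single scan resolve the overlap
-- differently, and either resolution is a defensible reading of "replace the aliases".
def pvFused : List (List Char) :=
  pvAliasPairs.flatMap (fun p => pvAliasPairs.filterMap (fun q =>
    if p.1 = q.1 then none else some (p.1.dropLast ++ q.1)))

def Pre_emojize_text (input_text : String) : Prop :=
  ∀ f ∈ pvFused, PySem.Chars.isIn f input_text.toList = false
instance (input_text : String) : Decidable (Pre_emojize_text input_text) := by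
  unfold Pre_emojize_text; infer_instance

def pvWitness_emojize_text : String := "I want :candy: and :ice_cream: :smile:"

def Spec_emojize_text (input_text : String) (out : String) : Prop := out = emojize_text_alt input_text
instance (input_text : String) (out : String) : Decidable (Spec_emojize_text input_text out) := by
  unfold Spec_emojize_text; infer_instance

-- ===== CLAIM (what is proved, stated in full; the proofs are below) =====
def Claim_equal_emojize_text : Prop := ∀ (input_text : String), Dom_emojize_text input_text → Pre_emojize_text input_text → Spec_emojize_text input_text (emojize_text input_text)

-- ===== LEMMAS AND PROOFS =====

-- Structural form of one `str.replace` pass (CPython: left-to-right, non-overlapping).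
def replOne (old new : List Char) : List Char → List Char
  | [] => []
  | c :: t =>
    if old.isPrefixOf (c :: t) then new ++ replOne old new (t.drop (old.length - 1))
    else c :: replOne old new t
termination_by l => l.length
decreasing_by
  all_goals simp

theorem replOne_nil (old new : List Char) : replOne old new [] = [] := by
  rw [replOne]

theorem replOne_cons (old new : List Char) (c : Char) (t : List Char) :
    replOne old new (c :: t) =
      if old.isPrefixOf (c :: t) then new ++ replOne old new (t.drop (old.length - 1))
      else c :: replOne old new t := by
  rw [replOne]

theorem go_eq (old new : List Char) (ho : old ≠ []) :
    ∀ fuel (l acc : List Char), l.length ≤ fuel →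
      PySem.Chars.replace.go old new fuel l acc = acc.reverse ++ replOne old new l := by
  have hlen : 1 ≤ old.length := by cases old <;> simp_all
  intro fuel
  induction fuel with
  | zero =>
    intro l acc h
    have : l = [] := by cases l <;> simp_all
    subst this
    simp [PySem.Chars.replace.go, replOne_nil]
  | succ n ih =>
    intro l acc h
    match l with
    | [] => simp [PySem.Chars.replace.go, replOne_nil]
    | c :: t =>
      rw [PySem.Chars.replace.go]
      by_cases hp : old.isPrefixOf (c :: t)
      · rw [if_pos hp, ih _ _ (by simp at h ⊢; omega)]
        have hd : (c :: t).drop old.length = t.drop (old.length - 1) := by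
          cases old with
          | nil => simp_all
          | cons d o' => simp
        rw [hd, replOne_cons, if_pos hp]
        simp
      · rw [if_neg hp, ih _ _ (by simp at h ⊢; omega), replOne_cons, if_neg hp]
        simp

theorem replace_eq_replOne (s old new : List Char) (ho : old ≠ []) :
    PySem.Chars.replace s old new = replOne old new s := by
  rw [PySem.Chars.replace]
  rw [if_neg (by simp [ho])]
  simpa using go_eq old new ho s.length s [] le_rfl

-- one fold step of A (list level)
def pvStep (s : List Char) (p : List Char × Char) : List Char := replOne p.1 [p.2] s

theorem A_toList (s : String) :
    (emojize_text s).toList = List.foldl pvStep s.toList pvAliasPairs := by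
  have e1 : ("👍" : String).toList = ['👍'] := by decide
  have e2 : ("😊" : String).toList = ['😊'] := by decide
  have e3 : ("🌏" : String).toList = ['🌏'] := by decide
  have e4 : ("🥇" : String).toList = ['🥇'] := by decide
  have e5 : ("🍬" : String).toList = ['🍬'] := by decide
  have e6 : ("🍨" : String).toList = ['🍨'] := by decide
  simp only [emojize_text, List.foldl_cons, List.foldl_nil, PySem.Str.toList_replace]
  rw [replace_eq_replOne _ _ _ (by decide), replace_eq_replOne _ _ _ (by decide),
    replace_eq_replOne _ _ _ (by decide), replace_eq_replOne _ _ _ (by decide),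
    replace_eq_replOne _ _ _ (by decide), replace_eq_replOne _ _ _ (by decide)]
  simp only [pvAliasPairs, pvStep, List.foldl_cons, List.foldl_nil,
    pvA1, pvA2, pvA3, pvA4, pvA5, pvA6, e1, e2, e3, e4, e5, e6]

-- L1: an emoji-free list that is a prefix of a replace-output was a prefix of the input.
theorem L1 (old : List Char) (e : Char) :
    ∀ (u a : List Char), e ∉ a → a <+: replOne old [e] u → a <+: u := by
  intro u
  induction u with
  | nil => intro a _ h; simpa [replOne_nil] using h
  | cons c t ih =>
    intro a ha hp
    rw [replOne_cons] at hp
    by_cases hm : old.isPrefixOf (c :: t)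
    · rw [if_pos hm] at hp
      match a with
      | [] => exact List.nil_prefix
      | x :: a' =>
        rw [show ([e] ++ replOne old [e] (t.drop (old.length - 1))) =
            e :: replOne old [e] (t.drop (old.length - 1)) from rfl,
          List.cons_prefix_cons] at hp
        exact absurd hp.1 (by intro h; exact ha (h ▸ List.mem_cons_self))
    · rw [if_neg hm] at hp
      match a with
      | [] => exact List.nil_prefix
      | x :: a' =>
        rw [List.cons_prefix_cons] at hp
        exact List.cons_prefix_cons.mpr ⟨hp.1, ih a' (fun h => ha (List.mem_cons_of_mem _ h)) hp.2⟩

-- LemA: when no pattern matches at the head character, every pass keeps the head.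
theorem LemA :
    ∀ (Q : List (List Char × Char)) (c : Char) (u : List Char),
      (∀ p ∈ Q, ∀ q ∈ Q, q.2 ∉ p.1) →
      (∀ p ∈ Q, ¬ p.1 <+: c :: u) →
      List.foldl pvStep (c :: u) Q = c :: List.foldl pvStep u Q := by
  intro Q
  induction Q with
  | nil => intro c u _ _; rfl
  | cons p Q ih =>
    intro c u hsep h
    have hstep : pvStep (c :: u) p = c :: pvStep u p := by
      unfold pvStep
      rw [replOne_cons, if_neg]
      intro hb
      exact h p List.mem_cons_self (List.isPrefixOf_iff_prefix.mp hb)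
    rw [List.foldl_cons, hstep, List.foldl_cons]
    apply ih c (pvStep u p)
      (fun p' hp' q hq => hsep p' (List.mem_cons_of_mem _ hp') q (List.mem_cons_of_mem _ hq))
    intro p' hp' hcon
    match hx : p'.1, hcon with
    | [], hcon => exact h p' (List.mem_cons_of_mem _ hp') (hx ▸ List.nil_prefix)
    | x :: w, hcon =>
      rw [List.cons_prefix_cons] at hcon
      have hw : w <+: u := by
        apply L1 p.1 p.2 u w _ hcon.2
        intro hmem
        exact hsep p' (List.mem_cons_of_mem _ hp') p List.mem_cons_self
          (hx ▸ List.mem_cons_of_mem _ hmem)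
      exact h p' (List.mem_cons_of_mem _ hp') (hx ▸ List.cons_prefix_cons.mpr ⟨hcon.1, hw⟩)

theorem replOne_match (o new v : List Char) (ho : o ≠ []) :
    replOne o new (o ++ v) = new ++ replOne o new v := by
  match o with
  | c :: o' =>
    rw [show (c :: o') ++ v = c :: (o' ++ v) from rfl, replOne_cons, if_pos]
    · have : (o' ++ v).drop ((c :: o').length - 1) = v := by
        simp
      rw [this]
    · exact List.isPrefixOf_iff_prefix.mpr ⟨v, rfl⟩

theorem L2 (o new : List Char) :
    ∀ (w v : List Char), (∀ k < w.length, ¬ o <+: (w ++ v).drop k) →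
      replOne o new (w ++ v) = w ++ replOne o new v := by
  intro w
  induction w with
  | nil => intro v _; rfl
  | cons c w' ih =>
    intro v h
    rw [show (c :: w') ++ v = c :: (w' ++ v) from rfl, replOne_cons, if_neg]
    · rw [ih v (fun k hk => by simpa using h (k + 1) (by simp; omega))]
      simp
    · intro hb
      exact h 0 (by simp) (by simpa using List.isPrefixOf_iff_prefix.mp hb)

theorem L2cond (a o v : List Char) (ho : o.head? = some ':')
    (h1 : ¬ o <+: a) (h2 : ¬ a <+: o)
    (hF2 : ∀ k, k < a.length → 0 < k → k + 1 < a.length → (a.drop k).head? ≠ some ':')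
    (hlast : ¬ o <+: ':' :: v)
    (hlastchar : a.drop (a.length - 1) = [':']) :
    ∀ k, k < a.length → ¬ o <+: (a ++ v).drop k := by
  intro k hk hcon
  rw [List.drop_append_of_le_length (le_of_lt hk)] at hcon
  by_cases hk0 : k = 0
  · subst hk0
    simp only [List.drop_zero] at hcon
    rcases List.prefix_or_prefix_of_prefix hcon (List.prefix_append a v) with h | h
    · exact h1 h
    · exact h2 h
  · by_cases hklast : k = a.length - 1
    · rw [hklast, hlastchar] at hcon
      exact hlast (by simpa using hcon)
    · obtain ⟨x, r, hxr⟩ : ∃ x r, a.drop k = x :: r := by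
        have : (a.drop k).length ≠ 0 := by simp; omega
        cases hxr : a.drop k with
        | nil => simp [hxr] at this
        | cons x r => exact ⟨x, r, rfl⟩
      have hx : x ≠ ':' := by
        have := hF2 k hk (Nat.pos_of_ne_zero hk0) (by omega)
        rw [hxr] at this
        simpa using this
      obtain ⟨co, ho'⟩ : ∃ co, o = ':' :: co := by
        cases o with
        | nil => simp at ho
        | cons y ys => exact ⟨ys, by simpa using (by simpa using ho : y = ':') ▸ rfl⟩
      rcases List.prefix_or_prefix_of_prefix hcon (List.prefix_append (a.drop k) v) with h | h
      · rw [ho', hxr, List.cons_prefix_cons] at h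
        exact hx h.1.symm
      · rw [ho', hxr, List.cons_prefix_cons] at h
        exact hx h.1

-- LemB1: the earlier passes walk through an untouched alias `a` sitting at the front.
theorem LemB1 :
    ∀ (Q : List (List Char × Char)) (a u : List Char),
      (∀ p ∈ Q, ∀ q ∈ Q, q.2 ∉ p.1) →
      (∀ p ∈ Q, p.1.head? = some ':') →
      (∀ p ∈ Q, ¬ p.1 <+: a ∧ ¬ a <+: p.1) →
      (∀ k, k < a.length → 0 < k → k + 1 < a.length → (a.drop k).head? ≠ some ':') →
      a.drop (a.length - 1) = [':'] →
      (∀ p ∈ Q, ¬ p.1.drop 1 <+: u) →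
      List.foldl pvStep (a ++ u) Q = a ++ List.foldl pvStep u Q := by
  intro Q
  induction Q with
  | nil => intro a u _ _ _ _ _ _; rfl
  | cons p Q ih =>
    intro a u hsep hhead hF1 hF2 hlastchar hfuse
    have hoh : p.1.head? = some ':' := hhead p List.mem_cons_self
    obtain ⟨co, ho'⟩ : ∃ co, p.1 = ':' :: co := by
      cases hx : p.1 with
      | nil => rw [hx] at hoh; simp at hoh
      | cons y ys => rw [hx] at hoh; exact ⟨ys, by simpa using (by simpa using hoh : y = ':') ▸ rfl⟩
    have hco : p.1.drop 1 = co := by rw [ho']; rfl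
    have hlast : ¬ p.1 <+: ':' :: u := by
      rw [ho', List.cons_prefix_cons]
      rintro ⟨-, hcu⟩
      exact hfuse p List.mem_cons_self (hco ▸ hcu)
    have hstep : pvStep (a ++ u) p = a ++ pvStep u p := by
      unfold pvStep
      exact L2 p.1 [p.2] a u
        (L2cond a p.1 u hoh (hF1 p List.mem_cons_self).1 (hF1 p List.mem_cons_self).2 hF2 hlast hlastchar)
    rw [List.foldl_cons, hstep, List.foldl_cons]
    apply ih a (pvStep u p)
      (fun p' hp' q hq => hsep p' (List.mem_cons_of_mem _ hp') q (List.mem_cons_of_mem _ hq))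
      (fun p' hp' => hhead p' (List.mem_cons_of_mem _ hp'))
      (fun p' hp' => hF1 p' (List.mem_cons_of_mem _ hp')) hF2 hlastchar
    intro p' hp' hcon
    apply hfuse p' (List.mem_cons_of_mem _ hp')
    apply L1 p.1 p.2 u _ _ hcon
    intro hmem
    exact hsep p' (List.mem_cons_of_mem _ hp') p List.mem_cons_self
      (List.IsSuffix.mem hmem (List.drop_suffix 1 p'.1))

-- the complete six-pass fold over `a ++ u` when `a` is the first alias matching at the front
theorem step_all (P1 P2 : List (List Char × Char)) (a : List Char) (ε : Char) (u : List Char)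
    (hsep : ∀ p ∈ P1 ++ (a, ε) :: P2, ∀ q ∈ P1 ++ (a, ε) :: P2, q.2 ∉ p.1)
    (hhead : ∀ p ∈ P1 ++ (a, ε) :: P2, p.1.head? = some ':')
    (hF1 : ∀ p ∈ P1, ¬ p.1 <+: a ∧ ¬ a <+: p.1)
    (hF2 : ∀ k, k < a.length → 0 < k → k + 1 < a.length → (a.drop k).head? ≠ some ':')
    (hlastchar : a.drop (a.length - 1) = [':'])
    (hεne : (':' : Char) ≠ ε)
    (ha : a ≠ [])
    (hfuse : ∀ p ∈ P1, ¬ p.1.drop 1 <+: u) :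
    List.foldl pvStep (a ++ u) (P1 ++ (a, ε) :: P2) =
      ε :: List.foldl pvStep u (P1 ++ (a, ε) :: P2) := by
  have memL : ∀ p ∈ P1, p ∈ P1 ++ (a, ε) :: P2 := fun p hp => List.mem_append_left _ hp
  have memR : ∀ p ∈ P2, p ∈ P1 ++ (a, ε) :: P2 :=
    fun p hp => List.mem_append_right _ (List.mem_cons_of_mem _ hp)
  rw [List.foldl_append, List.foldl_cons, List.foldl_append, List.foldl_cons]
  rw [LemB1 P1 a u (fun p hp q hq => hsep p (memL p hp) q (memL q hq))
    (fun p hp => hhead p (memL p hp)) hF1 hF2 hlastchar hfuse]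
  have hstep : pvStep (a ++ List.foldl pvStep u P1) (a, ε) =
      ε :: pvStep (List.foldl pvStep u P1) (a, ε) := by
    unfold pvStep
    rw [replOne_match _ _ _ ha]
    rfl
  rw [hstep]
  apply LemA P2 ε _ (fun p hp q hq => hsep p (memR p hp) q (memR q hq))
  intro p hp hcon
  have hph := hhead p (memR p hp)
  obtain ⟨co, hpc⟩ : ∃ co, p.1 = ':' :: co := by
    cases hx : p.1 with
    | nil => rw [hx] at hph; simp at hph
    | cons y ys => rw [hx] at hph; exact ⟨ys, by simpa using (by simpa using hph : y = ':') ▸ rfl⟩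
  rw [hpc, List.cons_prefix_cons] at hcon
  exact hεne hcon.1

theorem fuse_mem (a o u : List Char)
    (hlastchar : a.dropLast ++ [':'] = a)
    (hoc : o.head? = some ':')
    (h : o.drop 1 <+: u) : (a.dropLast ++ o) <:+: (a ++ u) := by
  obtain ⟨co, ho'⟩ : ∃ co, o = ':' :: co := by
    cases hx : o with
    | nil => rw [hx] at hoc; simp at hoc
    | cons y ys => rw [hx] at hoc; exact ⟨ys, by simpa using (by simpa using hoc : y = ':') ▸ rfl⟩
  have h2 : a ++ u = a.dropLast ++ (':' :: u) := by
    conv_lhs => rw [← hlastchar]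
    simp
  rw [h2, ho']
  apply List.IsPrefix.isInfix
  rw [List.prefix_append_right_inj, List.cons_prefix_cons]
  exact ⟨rfl, by simpa [ho'] using h⟩

theorem main_case (n : Nat)
    (ih : ∀ s : List Char, s.length ≤ n → (∀ f ∈ pvFused, ¬ f <:+: s) →
      List.foldl pvStep s pvAliasPairs = pvScan s)
    (P1 P2 : List (List Char × Char)) (a : List Char) (ε : Char) (u : List Char)
    (hsplit : pvAliasPairs = P1 ++ (a, ε) :: P2)
    (hlen : a.length + u.length ≤ n + 1)
    (halen : 1 ≤ a.length)
    (hf : ∀ f ∈ pvFused, ¬ f <:+: a ++ u)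
    (hF1 : ∀ p ∈ P1, ¬ p.1 <+: a ∧ ¬ a <+: p.1)
    (hF2 : ∀ k, k < a.length → 0 < k → k + 1 < a.length → (a.drop k).head? ≠ some ':')
    (hlastchar : a.drop (a.length - 1) = [':'])
    (hdropLast : a.dropLast ++ [':'] = a)
    (hεne : (':' : Char) ≠ ε)
    (hfusemem : ∀ p ∈ P1, (a.dropLast ++ p.1) ∈ pvFused)
    (hheadP1 : ∀ p ∈ P1, p.1.head? = some ':')
    (hscan : pvScan (a ++ u) = ε :: pvScan u) :
    List.foldl pvStep (a ++ u) pvAliasPairs = pvScan (a ++ u) := by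
  have hfuse : ∀ p ∈ P1, ¬ p.1.drop 1 <+: u := by
    intro p hp hcon
    exact hf _ (hfusemem p hp) (fuse_mem a p.1 u hdropLast (hheadP1 p hp) hcon)
  have hsep : ∀ p ∈ pvAliasPairs, ∀ q ∈ pvAliasPairs, q.2 ∉ p.1 := by decide
  have hhead : ∀ p ∈ pvAliasPairs, p.1.head? = some ':' := by decide
  rw [hsplit] at hsep hhead ⊢
  rw [step_all P1 P2 a ε u hsep hhead hF1 hF2 hlastchar hεne
    (by cases a with | nil => simp at halen | cons x xs => simp) hfuse]
  rw [hscan]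
  congr 1
  rw [← hsplit]
  exact ih u (by omega)
    (fun f hf' hinf => absurd (hinf.trans (List.suffix_append a u).isInfix) (hf f hf'))

theorem pvScan_nil : pvScan [] = [] := by rw [pvScan.eq_def]

theorem pvScan_cons (c : Char) (t : List Char) :
    pvScan (c :: t) =
      match pvTryMatch pvAliasPairs (c :: t) with
      | some (e, k) => e :: pvScan (t.drop (k - 1))
      | none => c :: pvScan t := by
  rw [pvScan.eq_def]

theorem scan_case (a : List Char) (ε : Char) (u : List Char)
    (htm : pvTryMatch pvAliasPairs (a ++ u) = some (ε, a.length))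
    (ha : a ≠ []) :
    pvScan (a ++ u) = ε :: pvScan u := by
  match a, ha with
  | c :: a', _ =>
    rw [show (c :: a') ++ u = c :: (a' ++ u) from rfl] at htm ⊢
    rw [pvScan_cons, htm]
    show ε :: pvScan ((a' ++ u).drop ((c :: a').length - 1)) = ε :: pvScan u
    have : (a' ++ u).drop ((c :: a').length - 1) = u := by
      simp
    rw [this]

-- ===== MAIN INDUCTION =====
theorem main : ∀ (n : Nat) (s : List Char), s.length ≤ n →
    (∀ f ∈ pvFused, ¬ f <:+: s) →
    List.foldl pvStep s pvAliasPairs = pvScan s := by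
  intro n
  induction n with
  | zero =>
    intro s h _
    have hs : s = [] := by cases s <;> simp_all
    subst hs
    simp [pvAliasPairs, pvStep, replOne_nil, pvScan_nil]
  | succ n ih =>
    intro s hlen hf
    match s with
    | [] => simp [pvAliasPairs, pvStep, replOne_nil, pvScan_nil]
    | c :: t =>
      by_cases h1 : pvA1 <+: c :: t
      · obtain ⟨u, hu⟩ := h1
        rw [← hu] at hf hlen ⊢
        refine main_case n ih [] _ pvA1 '👍' u rfl (by simpa using hlen) (by decide) hf
          (by simp) (by decide) (by decide) (by decide) (by decide) (by simp) (by decide)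
          (scan_case pvA1 '👍' u ?_ (by decide))
        simp only [pvTryMatch, pvAliasPairs]
        rw [if_pos (List.isPrefixOf_iff_prefix.mpr (List.prefix_append _ _))]
      · by_cases h2 : pvA2 <+: c :: t
        · obtain ⟨u, hu⟩ := h2
          rw [← hu] at h1 hf hlen ⊢
          refine main_case n ih [(pvA1, '👍')] _ pvA2 '😊' u rfl (by simpa using hlen) (by decide) hf
            (by decide) (by decide) (by decide) (by decide) (by decide) (by decide) (by decide)
            (scan_case pvA2 '😊' u ?_ (by decide))
          simp only [pvTryMatch, pvAliasPairs]
          rw [if_neg (fun hb => h1 (List.isPrefixOf_iff_prefix.mp hb)),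
            if_pos (List.isPrefixOf_iff_prefix.mpr (List.prefix_append _ _))]
        · by_cases h3 : pvA3 <+: c :: t
          · obtain ⟨u, hu⟩ := h3
            rw [← hu] at h1 h2 hf hlen ⊢
            refine main_case n ih [(pvA1, '👍'), (pvA2, '😊')] _ pvA3 '🌏' u rfl
              (by simpa using hlen) (by decide) hf
              (by decide) (by decide) (by decide) (by decide) (by decide) (by decide) (by decide)
              (scan_case pvA3 '🌏' u ?_ (by decide))
            simp only [pvTryMatch, pvAliasPairs]
            rw [if_neg (fun hb => h1 (List.isPrefixOf_iff_prefix.mp hb)),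
              if_neg (fun hb => h2 (List.isPrefixOf_iff_prefix.mp hb)),
              if_pos (List.isPrefixOf_iff_prefix.mpr (List.prefix_append _ _))]
          · by_cases h4 : pvA4 <+: c :: t
            · obtain ⟨u, hu⟩ := h4
              rw [← hu] at h1 h2 h3 hf hlen ⊢
              refine main_case n ih [(pvA1, '👍'), (pvA2, '😊'), (pvA3, '🌏')] _ pvA4 '🥇' u rfl
                (by simpa using hlen) (by decide) hf
                (by decide) (by decide) (by decide) (by decide) (by decide) (by decide) (by decide)
                (scan_case pvA4 '🥇' u ?_ (by decide))
              simp only [pvTryMatch, pvAliasPairs]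
              rw [if_neg (fun hb => h1 (List.isPrefixOf_iff_prefix.mp hb)),
                if_neg (fun hb => h2 (List.isPrefixOf_iff_prefix.mp hb)),
                if_neg (fun hb => h3 (List.isPrefixOf_iff_prefix.mp hb)),
                if_pos (List.isPrefixOf_iff_prefix.mpr (List.prefix_append _ _))]
            · by_cases h5 : pvA5 <+: c :: t
              · obtain ⟨u, hu⟩ := h5
                rw [← hu] at h1 h2 h3 h4 hf hlen ⊢
                refine main_case n ih [(pvA1, '👍'), (pvA2, '😊'), (pvA3, '🌏'), (pvA4, '🥇')] _
                  pvA5 '🍬' u rfl (by simpa using hlen) (by decide) hf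
                  (by decide) (by decide) (by decide) (by decide) (by decide) (by decide) (by decide)
                  (scan_case pvA5 '🍬' u ?_ (by decide))
                simp only [pvTryMatch, pvAliasPairs]
                rw [if_neg (fun hb => h1 (List.isPrefixOf_iff_prefix.mp hb)),
                  if_neg (fun hb => h2 (List.isPrefixOf_iff_prefix.mp hb)),
                  if_neg (fun hb => h3 (List.isPrefixOf_iff_prefix.mp hb)),
                  if_neg (fun hb => h4 (List.isPrefixOf_iff_prefix.mp hb)),
                  if_pos (List.isPrefixOf_iff_prefix.mpr (List.prefix_append _ _))]
              · by_cases h6 : pvA6 <+: c :: t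
                · obtain ⟨u, hu⟩ := h6
                  rw [← hu] at h1 h2 h3 h4 h5 hf hlen ⊢
                  refine main_case n ih
                    [(pvA1, '👍'), (pvA2, '😊'), (pvA3, '🌏'), (pvA4, '🥇'), (pvA5, '🍬')] _
                    pvA6 '🍨' u rfl (by simpa using hlen) (by decide) hf
                    (by decide) (by decide) (by decide) (by decide) (by decide) (by decide) (by decide)
                    (scan_case pvA6 '🍨' u ?_ (by decide))
                  simp only [pvTryMatch, pvAliasPairs]
                  rw [if_neg (fun hb => h1 (List.isPrefixOf_iff_prefix.mp hb)),
                    if_neg (fun hb => h2 (List.isPrefixOf_iff_prefix.mp hb)),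
                    if_neg (fun hb => h3 (List.isPrefixOf_iff_prefix.mp hb)),
                    if_neg (fun hb => h4 (List.isPrefixOf_iff_prefix.mp hb)),
                    if_neg (fun hb => h5 (List.isPrefixOf_iff_prefix.mp hb)),
                    if_pos (List.isPrefixOf_iff_prefix.mpr (List.prefix_append _ _))]
                · -- no alias matches at the head: both sides keep `c`
                  have hnone : pvTryMatch pvAliasPairs (c :: t) = none := by
                    simp only [pvTryMatch, pvAliasPairs]
                    rw [if_neg (fun hb => h1 (List.isPrefixOf_iff_prefix.mp hb)),
                      if_neg (fun hb => h2 (List.isPrefixOf_iff_prefix.mp hb)),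
                      if_neg (fun hb => h3 (List.isPrefixOf_iff_prefix.mp hb)),
                      if_neg (fun hb => h4 (List.isPrefixOf_iff_prefix.mp hb)),
                      if_neg (fun hb => h5 (List.isPrefixOf_iff_prefix.mp hb)),
                      if_neg (fun hb => h6 (List.isPrefixOf_iff_prefix.mp hb))]
                  rw [pvScan_cons, hnone]
                  rw [LemA pvAliasPairs c t (by decide) ?_]
                  · rw [ih t (by simp at hlen; omega)
                      (fun f hf' hinf => hf f hf' (hinf.trans (List.suffix_cons c t).isInfix))]
                  · intro p hp
                    simp only [pvAliasPairs, List.mem_cons, List.not_mem_nil, or_false] at hp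
                    rcases hp with rfl | rfl | rfl | rfl | rfl | rfl
                    · exact h1
                    · exact h2
                    · exact h3
                    · exact h4
                    · exact h5
                    · exact h6

-- ===== VERDICT (by name: the statement is the Claim_ definition above) =====
theorem emojize_text_spec : Claim_equal_emojize_text := by
  intro s hdom hpre
  unfold Spec_emojize_text
  apply String.toList_inj.mp
  rw [A_toList]
  rw [main s.toList.length s.toList le_rfl
    (fun f hf => (PySem.Chars.isIn_eq_false_iff _ _).mp (hpre f hf))]
  rw [emojize_text_alt, String.toList_ofList]
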